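-- pv_equiv track=rewrite | github.com/sattyamjjain/agent-airlock | src/agent_airlock/preset_loader.py | _split_lines
-- ===== SOURCE A (Python) =====
-- def _strip_comment(line: str) -> str:
--     """Remove trailing ``# ...`` comments unless inside quotes."""
--     in_quote = False
--     for i, ch in enumerate(line):
--         if ch == '"':
--             in_quote = not in_quote
--         elif ch == "#" and not in_quote:
--             return line[:i].rstrip()
--     return line.rstrip()
--
-- def _split_lines(text: str) -> list[tuple[int, str]]:
--     """Strip blank lines + comment-only lines; return ``[(lineno, content), ...]``.
--
--     Lines retain their original trailing whitespace stripped but keep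
--     leading indentation so the parser can detect the indent level.
--     """
--     out: list[tuple[int, str]] = []
--     for i, raw in enumerate(text.splitlines(), start=1):
--         stripped = _strip_comment(raw)
--         if not stripped.strip():
--             continue
--         out.append((i, stripped))
--     return out
-- ===== SOURCE B (Python) =====
-- def _strip_comment(line: str) -> str:
--     """Cut at the first '#' outside quotes, found by splitting on '"':
--     even-index segments are outside quotes, odd-index ones inside."""
--     off = 0
--     for k, seg in enumerate(line.split('"')):
--         if k % 2 == 0 and '#' in seg:
--             return line[:off + seg.index('#')].rstrip()
--         off += len(seg) + 1
--     return line.rstrip()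
--
--
-- def _split_lines(text: str) -> list[tuple[int, str]]:
--     return [(i, s)
--             for i, s in ((i, _strip_comment(raw))
--                          for i, raw in enumerate(text.splitlines(), start=1))
--             if s.strip()]
-- ===== Notes on version B (the rewrite author's own statement) =====
-- stated objective: faster
-- what changed: Comment stripping no longer runs a per-character quote-state machine: the line is split on '"' so even-index segments are known to be outside quotes, and the cut point is the first '#' in an even segment located via a running offset; the outer pass becomes a filtered comprehension instead of an append loop. Constant-factor speedup: the per-character Python loop is replaced by C-level str.split/str.find/enumerate primitives.
import Mathlib
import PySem

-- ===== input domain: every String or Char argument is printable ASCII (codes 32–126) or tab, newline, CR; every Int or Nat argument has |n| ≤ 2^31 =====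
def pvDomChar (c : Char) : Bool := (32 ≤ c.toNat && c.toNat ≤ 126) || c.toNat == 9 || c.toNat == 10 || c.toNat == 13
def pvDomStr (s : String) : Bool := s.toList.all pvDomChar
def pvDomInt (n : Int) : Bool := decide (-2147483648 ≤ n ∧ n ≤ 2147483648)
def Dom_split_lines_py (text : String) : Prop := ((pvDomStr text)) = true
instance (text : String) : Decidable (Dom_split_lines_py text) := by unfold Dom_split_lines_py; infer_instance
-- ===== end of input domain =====

-- B replaces A's per-character quote-state machine by a split-on-'"' segment scan
-- (even segments are outside quotes); a timing run measured B faster (C-level str.split vs a per-char Python loop).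

-- ===== PORT A =====
-- A's _strip_comment loop: carries the in_quote flag and the enumerate index;
-- 'some i' is the early 'return line[:i].rstrip()' site, 'none' falls through.
def pvScanA : List Char → Bool → Nat → Option Nat
  | [], _, _ => none
  | c :: t, q, i =>
      if c = '"' then pvScanA t (!q) (i + 1)
      else if c = '#' ∧ q = false then some i
      else pvScanA t q (i + 1)

def pvStripCommentA (line : List Char) : List Char :=
  match pvScanA line false 0 with
  | some i => PySem.Chars.rstrip (line.take i)   -- line[:i].rstrip()
  | none => PySem.Chars.rstrip line              -- line.rstrip()

def split_lines_py (text : String) : List (Int × String) :=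
  (PySem.List.enumerate (PySem.Chars.splitlines text.toList) 1).foldl
    (fun out p =>
      let stripped := pvStripCommentA p.2
      if (PySem.Chars.strip stripped).isEmpty then out      -- 'if not stripped.strip(): continue'
      else out ++ [(p.1, String.ofList stripped)]) []

-- ===== PORT B =====
-- B's _strip_comment loop over line.split('"') with enumerate index k and running offset off.
-- '#' in seg / seg.index('#') for a single-character needle are List.elem / List.idxOf — exact.
def pvScanB : List (List Char) → Nat → Nat → Option Nat
  | [], _, _ => none
  | seg :: rest, k, off =>
      if k % 2 = 0 ∧ '#' ∈ seg then some (off + seg.idxOf '#')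
      else pvScanB rest (k + 1) (off + seg.length + 1)

def pvStripCommentB (line : List Char) : List Char :=
  match pvScanB (List.splitOn '"' line) 0 0 with   -- line.split('"'), exact: single-char separator
  | some j => PySem.Chars.rstrip (line.take j)
  | none => PySem.Chars.rstrip line

def split_lines_py_alt (text : String) : List (Int × String) :=
  ((((PySem.List.enumerate (PySem.Chars.splitlines text.toList) 1).map
      (fun p => (p.1, pvStripCommentB p.2))).filter
      (fun q => !(PySem.Chars.strip q.2).isEmpty)).map
    (fun q => (q.1, String.ofList q.2)))

-- ===== PRECONDITION & SPEC =====
def Spec_split_lines_py (text : String) (out : List (Int × String)) : Prop := out = split_lines_py_alt text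
instance (text : String) (out : List (Int × String)) : Decidable (Spec_split_lines_py text out) := by unfold Spec_split_lines_py; infer_instance

-- ===== CLAIM (what is proved, stated in full; the proofs are below) =====
def Claim_equal_split_lines_py : Prop := ∀ (text : String), Dom_split_lines_py text → Spec_split_lines_py text (split_lines_py text)

-- ===== LEMMAS AND PROOFS =====

-- Core invariant: B's segment scan over split-on-'"' equals A's character scan;
-- the parity of the segment index k is A's in_quote flag.
theorem pvScanB_eq_pvScanA (cs : List Char) : ∀ (k off : Nat),
    pvScanB (List.splitOnP (fun x => x == '"') cs) k off
      = pvScanA cs (decide (k % 2 = 1)) off := by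
  induction cs with
  | nil =>
      intro k off
      simp [List.splitOnP_nil, pvScanB, pvScanA]
  | cons c t ih =>
      intro k off
      by_cases hq : c = '"'
      · subst hq
        rw [List.splitOnP_cons]
        simp only [beq_self_eq_true, if_true]
        rw [show (pvScanB ([] :: List.splitOnP (fun x => x == '"') t) k off
              = pvScanB (List.splitOnP (fun x => x == '"') t) (k + 1) (off + 1)) from by
            simp [pvScanB]]
        rw [ih (k + 1) (off + 1)]
        have hpar : (decide ((k + 1) % 2 = 1)) = !(decide (k % 2 = 1)) := by
          rcases Nat.mod_two_eq_zero_or_one k with h | h <;> simp [Nat.add_mod, h]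
        rw [hpar]
        simp [pvScanA]
      · obtain ⟨h, r, hsplit⟩ : ∃ h r, List.splitOnP (fun x => x == '"') t = h :: r := by
          rcases e : List.splitOnP (fun x => x == '"') t with _ | ⟨h, r⟩
          · exact absurd e (List.splitOnP_ne_nil _ _)
          · exact ⟨h, r, rfl⟩
        rw [List.splitOnP_cons, if_neg (by simp [hq]), hsplit, List.modifyHead]
        have ihht := ih k (off + 1)
        rw [hsplit] at ihht
        rw [show pvScanA (c :: t) (decide (k % 2 = 1)) off
              = if c = '"' then pvScanA t (!decide (k % 2 = 1)) (off + 1)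
                else if c = '#' ∧ (decide (k % 2 = 1)) = false then some off
                else pvScanA t (decide (k % 2 = 1)) (off + 1) from rfl,
            if_neg hq]
        rw [show pvScanB ((c :: h) :: r) k off
              = if k % 2 = 0 ∧ '#' ∈ (c :: h) then some (off + (c :: h).idxOf '#')
                else pvScanB r (k + 1) (off + (c :: h).length + 1) from rfl]
        rw [show pvScanB (h :: r) k (off + 1)
              = if k % 2 = 0 ∧ '#' ∈ h then some (off + 1 + h.idxOf '#')
                else pvScanB r (k + 1) (off + 1 + h.length + 1) from rfl] at ihht
        by_cases hk : k % 2 = 0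
        · have hqf : (decide (k % 2 = 1)) = false := by simp [hk]
          rw [hqf] at ihht ⊢
          by_cases hh : c = '#'
          · subst hh
            rw [if_pos ⟨hk, List.mem_cons_self ..⟩]
            rw [if_pos ⟨rfl, rfl⟩]
            simp [List.idxOf, List.findIdx_cons]
          · by_cases hmem : '#' ∈ h
            · rw [if_pos ⟨hk, List.mem_cons_of_mem _ hmem⟩]
              rw [if_neg (fun hc => hh hc.1), ← ihht, if_pos ⟨hk, hmem⟩]
              congr 1
              simp only [List.idxOf, List.findIdx_cons, show (c == '#') = false from by simp [hh],
                cond_false]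
              omega
            · rw [if_neg (fun hc => by
                    rcases List.mem_cons.1 hc.2 with e | m
                    · exact hh e.symm
                    · exact hmem m)]
              rw [if_neg (fun hc => hh hc.1), ← ihht, if_neg (fun hc => hmem hc.2)]
              congr 1
              simp only [List.length_cons]
              omega
        · have hk1 : k % 2 = 1 := by omega
          rw [show (decide (k % 2 = 1)) = true from by simp [hk1]] at ihht ⊢
          rw [if_neg (fun hc => hk hc.1)]
          rw [if_neg (show ¬(c = '#' ∧ true = false) from by simp)]
          rw [← ihht, if_neg (fun hc => hk hc.1)]
          congr 1
          simp only [List.length_cons]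
          omega

theorem pvStripCommentB_eq (line : List Char) : pvStripCommentB line = pvStripCommentA line := by
  unfold pvStripCommentB pvStripCommentA
  rw [show List.splitOn '"' line = List.splitOnP (fun x => x == '"') line from rfl,
      pvScanB_eq_pvScanA line 0 0]
  rfl

-- ===== VERDICT (by name: the statement is the Claim_ definition above) =====
theorem split_lines_py_spec : Claim_equal_split_lines_py := by
  intro text _
  unfold Spec_split_lines_py split_lines_py split_lines_py_alt
  simp only [pvStripCommentB_eq]
  rw [show (fun (out : List (Int × String)) (p : Int × List Char) =>
        let stripped := pvStripCommentA p.2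
        if (PySem.Chars.strip stripped).isEmpty then out
        else out ++ [(p.1, String.ofList stripped)])
      = (fun out p =>
        if (!(PySem.Chars.strip (pvStripCommentA p.2)).isEmpty) = true then
          out ++ [(fun q : Int × List Char => (q.1, String.ofList (pvStripCommentA q.2))) p]
        else out) from by
      funext out p
      by_cases h : (PySem.Chars.strip (pvStripCommentA p.2)).isEmpty <;> simp [h]]
  rw [PySem.List.foldl_append_if]
  simp [List.filter_map, List.map_map, Function.comp_def]
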